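-- pv_equiv track=rewrite | github.com/nismod/east-africa-transport | scripts/preprocess/other_networks/multi_modal.py | add_country_code_to_costs
-- ===== SOURCE A (Python) =====
-- def add_country_code_to_costs(x,country_codes):
--     country = str(x["Country"]).strip().lower()
--     match = [c[0] for c in country_codes if str(c[1]).strip().lower() == country]
--     if match:
--         return match
--     else:
--         match = [c[0] for c in country_codes if str(c[1]).strip().lower() in country]
--         if match:
--             return match
--         else:
--             match = [c[0] for c in country_codes if str(c[2]).strip().lower() in country]
--             if match:
--                 return match
--             else:
--                 return ["XYZ"]
-- ===== SOURCE B (Python) =====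
-- def add_country_code_to_costs(x, country_codes):
--     country = str(x["Country"]).strip().lower()
--     exact, sub1, sub2 = [], [], []
--     for c in country_codes:
--         name = str(c[1]).strip().lower()
--         if name == country:
--             exact.append(c[0])
--         elif name in country:
--             sub1.append(c[0])
--         elif str(c[2]).strip().lower() in country:
--             sub2.append(c[0])
--     return exact or sub1 or sub2 or ["XYZ"]
-- ===== Notes on version B (the rewrite author's own statement) =====
-- stated objective: alternative
-- what changed: Replaces A's three sequential full scans (exact match, name-substring, code-substring) with a single pass that bins each row into one of three disjoint candidate lists via an elif chain, then returns the first nonempty bin.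
import Mathlib
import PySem

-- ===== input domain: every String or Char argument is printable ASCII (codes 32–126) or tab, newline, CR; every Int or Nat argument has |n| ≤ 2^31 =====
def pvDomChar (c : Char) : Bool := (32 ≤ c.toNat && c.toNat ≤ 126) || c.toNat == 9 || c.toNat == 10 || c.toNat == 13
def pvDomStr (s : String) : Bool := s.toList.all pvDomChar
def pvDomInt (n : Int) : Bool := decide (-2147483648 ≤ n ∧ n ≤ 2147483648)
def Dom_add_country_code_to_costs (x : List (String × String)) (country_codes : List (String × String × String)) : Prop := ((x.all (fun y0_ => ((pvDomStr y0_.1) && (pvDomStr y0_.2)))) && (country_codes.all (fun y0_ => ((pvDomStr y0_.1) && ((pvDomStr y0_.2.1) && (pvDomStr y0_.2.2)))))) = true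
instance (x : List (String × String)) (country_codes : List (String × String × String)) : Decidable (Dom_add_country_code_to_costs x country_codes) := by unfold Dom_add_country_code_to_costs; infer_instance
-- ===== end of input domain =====

-- B makes one pass binning rows into three priority lists instead of A's three sequential full scans.

-- ===== PORT A =====
-- str(s).strip().lower() of a string value
def pvNorm (s : String) : String := PySem.Str.lower (PySem.Str.strip s)

def add_country_code_to_costs (x : List (String × String)) (country_codes : List (String × String × String)) : List String :=
  match (PySem.Dict.mk x).get? "Country" with
  | none => []   -- KeyError in Python; excluded by Pre_
  | some v =>
    let country := pvNorm v
    let match1 := (country_codes.filter (fun c => pvNorm c.2.1 == country)).map (·.1)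
    if match1 ≠ [] then match1
    else
      let match2 := (country_codes.filter (fun c => PySem.Str.isIn (pvNorm c.2.1) country)).map (·.1)
      if match2 ≠ [] then match2
      else
        let match3 := (country_codes.filter (fun c => PySem.Str.isIn (pvNorm c.2.2) country)).map (·.1)
        if match3 ≠ [] then match3
        else ["XYZ"]

-- ===== PORT B =====
def pvBinStep (country : String) (acc : List String × List String × List String)
    (c : String × String × String) : List String × List String × List String :=
  let name := pvNorm c.2.1
  if name == country then (acc.1 ++ [c.1], acc.2.1, acc.2.2)
  else if PySem.Str.isIn name country then (acc.1, acc.2.1 ++ [c.1], acc.2.2)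
  else if PySem.Str.isIn (pvNorm c.2.2) country then (acc.1, acc.2.1, acc.2.2 ++ [c.1])
  else acc

def add_country_code_to_costs_alt (x : List (String × String)) (country_codes : List (String × String × String)) : List String :=
  match (PySem.Dict.mk x).get? "Country" with
  | none => []
  | some v =>
    let country := pvNorm v
    let bins := country_codes.foldl (pvBinStep country) ([], [], [])
    if bins.1 ≠ [] then bins.1
    else if bins.2.1 ≠ [] then bins.2.1
    else if bins.2.2 ≠ [] then bins.2.2
    else ["XYZ"]

-- ===== PRECONDITION & SPEC =====
-- Pre_ excludes exactly the inputs where Python A raises KeyError: x lacking the "Country" key.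
def Pre_add_country_code_to_costs (x : List (String × String)) (_country_codes : List (String × String × String)) : Prop :=
  (PySem.Dict.mk x).contains "Country" = true
instance (x : List (String × String)) (country_codes : List (String × String × String)) : Decidable (Pre_add_country_code_to_costs x country_codes) := by unfold Pre_add_country_code_to_costs; infer_instance

def pvWitness_add_country_code_to_costs : (List (String × String)) × (List (String × String × String)) :=
  ([("Country", " Kenya ")], [("KEN", "Kenya", "KE"), ("TZA", "Tanzania", "TZ")])

def Spec_add_country_code_to_costs (x : List (String × String)) (country_codes : List (String × String × String)) (out : List String) : Prop := out = add_country_code_to_costs_alt x country_codes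
instance (x : List (String × String)) (country_codes : List (String × String × String)) (out : List String) : Decidable (Spec_add_country_code_to_costs x country_codes out) := by unfold Spec_add_country_code_to_costs; infer_instance

-- ===== CLAIM (what is proved, stated in full; the proofs are below) =====
def Claim_equal_add_country_code_to_costs : Prop := ∀ (x : List (String × String)) (country_codes : List (String × String × String)), Dom_add_country_code_to_costs x country_codes → Pre_add_country_code_to_costs x country_codes → Spec_add_country_code_to_costs x country_codes (add_country_code_to_costs x country_codes)

-- ===== LEMMAS AND PROOFS =====

-- the fold produces the three disjoint filtered bins, appended to the accumulators
theorem pvBins_eq (country : String) (l : List (String × String × String))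
    (a b c : List String) :
    l.foldl (pvBinStep country) (a, b, c) =
      (a ++ (l.filter (fun r => pvNorm r.2.1 == country)).map (·.1),
       b ++ (l.filter (fun r => !(pvNorm r.2.1 == country) && PySem.Str.isIn (pvNorm r.2.1) country)).map (·.1),
       c ++ (l.filter (fun r => !(pvNorm r.2.1 == country) && !(PySem.Str.isIn (pvNorm r.2.1) country) && PySem.Str.isIn (pvNorm r.2.2) country)).map (·.1)) := by
  induction l generalizing a b c with
  | nil => simp
  | cons h t ih =>
    simp only [List.foldl_cons, List.filter_cons]
    by_cases h1 : (pvNorm h.2.1 == country) = true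
    · simp [pvBinStep, h1, ih]
    · rw [Bool.not_eq_true] at h1
      by_cases h2 : PySem.Chars.isIn (pvNorm h.2.1).toList country.toList = true
      · simp [pvBinStep, h1, h2, ih]
      · rw [Bool.not_eq_true] at h2
        by_cases h3 : PySem.Chars.isIn (pvNorm h.2.2).toList country.toList = true
        · simp [pvBinStep, h1, h2, h3, ih]
        · rw [Bool.not_eq_true] at h3
          simp [pvBinStep, h1, h2, h3, ih]

theorem add_country_code_to_costs_spec : Claim_equal_add_country_code_to_costs := by
  intro x cc _ _
  show add_country_code_to_costs x cc = add_country_code_to_costs_alt x cc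
  unfold add_country_code_to_costs add_country_code_to_costs_alt
  cases hv : (PySem.Dict.mk x).get? "Country" with
  | none => rfl
  | some v =>
    simp only [pvBins_eq, List.nil_append, PySem.Str.isIn_eq]
    set country := pvNorm v with hc
    by_cases h1 : (cc.filter (fun c => pvNorm c.2.1 == country)).map (·.1) = []
    · have hall1 : ∀ r ∈ cc, (pvNorm r.2.1 == country) = false := by
        intro r hr
        have := List.filter_eq_nil_iff.mp (List.map_eq_nil_iff.mp h1) r hr
        simp_all
      have hfe2 : cc.filter (fun r => !(pvNorm r.2.1 == country) && PySem.Chars.isIn (pvNorm r.2.1).toList country.toList)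
          = cc.filter (fun r => PySem.Chars.isIn (pvNorm r.2.1).toList country.toList) := by
        apply List.filter_congr
        intro r hr
        simp [hall1 r hr]
      by_cases h2 : (cc.filter (fun c => PySem.Chars.isIn (pvNorm c.2.1).toList country.toList)).map (·.1) = []
      · have hall2 : ∀ r ∈ cc, PySem.Chars.isIn (pvNorm r.2.1).toList country.toList = false := by
          intro r hr
          have := List.filter_eq_nil_iff.mp (List.map_eq_nil_iff.mp h2) r hr
          simp_all
        have hfe3 : cc.filter (fun r => !(pvNorm r.2.1 == country) && !(PySem.Chars.isIn (pvNorm r.2.1).toList country.toList) && PySem.Chars.isIn (pvNorm r.2.2).toList country.toList)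
            = cc.filter (fun r => PySem.Chars.isIn (pvNorm r.2.2).toList country.toList) := by
          apply List.filter_congr
          intro r hr
          simp [hall1 r hr, hall2 r hr]
        simp [h1, h2, hfe2, hfe3]
        rw [hfe3]
      · simp [h1, h2, hfe2]
    · simp [h1]
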